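-- pv_equiv track=rewrite | github.com/avilamowski/hyper_jade | ejemplos/ej1-2025-s1-r2/alumn_37.py | palabras_numericas
-- ===== SOURCE A (Python) =====
-- def palabras_numericas(texto):
--     res = []
--     numeros = ""
--     for i in range(len(texto)):
--         if texto[i] != " " and ("0" <= texto[i] <= "9"):
--             numeros += texto[i]
--         else:
--             OK = True
--             if numeros != "":
--                 for j in range(len(numeros)):
--                     if (
--                         ("a" <= numeros[j] <= "z")
--                         or ("A" <= numeros[j] <= "Z")
--                         or (numeros[j] == " ")
--                     ):
--                         OK = False
--                 if OK:
--                     res.append(numeros)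
--                     numeros = ""
--     if numeros:
--         res.append(numeros)
--     return res[1:]
-- ===== SOURCE B (Python) =====
-- def palabras_numericas(texto):
--     espaciado = "".join(c if "0" <= c <= "9" else " " for c in texto)
--     return espaciado.split()[1:]
-- ===== Notes on version B (the rewrite author's own statement) =====
-- stated objective: simpler
-- what changed: Replaces A's one-pass state machine (mutable run buffer, per-boundary letter/space validation loop, trailing flush) by two staged passes: map every non-digit character to a space, then str.split() and slice off the first word.
import Mathlib
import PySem

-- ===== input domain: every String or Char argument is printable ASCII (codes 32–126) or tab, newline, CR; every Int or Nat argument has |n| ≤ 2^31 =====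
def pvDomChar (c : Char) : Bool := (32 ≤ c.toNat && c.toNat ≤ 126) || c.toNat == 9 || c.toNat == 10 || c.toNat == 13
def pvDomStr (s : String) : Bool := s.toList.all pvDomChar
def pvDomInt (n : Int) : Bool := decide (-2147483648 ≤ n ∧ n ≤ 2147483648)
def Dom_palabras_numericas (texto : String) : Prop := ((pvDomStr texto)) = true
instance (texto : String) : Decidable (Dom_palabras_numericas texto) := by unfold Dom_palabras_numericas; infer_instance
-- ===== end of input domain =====

-- B replaces A's run-buffer state machine (with its redundant inner validation pass) by two
-- staged passes: mask every non-digit to a space, then str.split() and drop the first word (simpler).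

-- ===== PORT A =====
-- A's inner 'for j' loop over the accumulated string 'numeros' (sets OK := False on a letter or space).
def pvAok (numeros : List Char) : Bool :=
  numeros.foldl
    (fun ok d =>
      if ('a' ≤ d ∧ d ≤ 'z') ∨ ('A' ≤ d ∧ d ≤ 'Z') ∨ d = ' ' then false else ok)
    true

-- A's main loop: state (res, numeros); 'numeros' (a Python str of chars) is carried as its char list.
def pvAstep (st : List String × List Char) (c : Char) : List String × List Char :=
  let (res, nums) := st
  if c ≠ ' ' ∧ ('0' ≤ c ∧ c ≤ '9') then (res, nums ++ [c])
  else
    if nums ≠ [] then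
      if pvAok nums then (res ++ [String.ofList nums], []) else (res, nums)
    else (res, nums)

def palabras_numericas (texto : String) : List String :=
  let p := texto.toList.foldl pvAstep ([], [])
  let res := if p.2 ≠ [] then p.1 ++ [String.ofList p.2] else p.1
  PySem.List.slice res (some 1) none   -- res[1:]

-- ===== PORT B =====
def pvIsDig (c : Char) : Bool := decide ('0' ≤ c ∧ c ≤ '9')

-- 'c if "0" <= c <= "9" else " "' inside the join
def pvMask (c : Char) : Char := if pvIsDig c then c else ' '

def palabras_numericas_alt (texto : String) : List String :=
  let espaciado := String.ofList (texto.toList.map pvMask)   -- "".join(... for c in texto)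
  PySem.List.slice (PySem.Str.split₀ espaciado) (some 1) none   -- espaciado.split()[1:]

-- ===== PRECONDITION & SPEC =====
def Spec_palabras_numericas (texto : String) (out : List String) : Prop := out = palabras_numericas_alt texto
instance (texto : String) (out : List String) : Decidable (Spec_palabras_numericas texto out) := by unfold Spec_palabras_numericas; infer_instance

-- ===== CLAIM (what is proved, stated in full; the proofs are below) =====
def Claim_equal_palabras_numericas : Prop := ∀ (texto : String), Dom_palabras_numericas texto → Spec_palabras_numericas texto (palabras_numericas texto)

-- ===== LEMMAS AND PROOFS =====

-- Common reference: the maximal digit runs of l, with a pending run 'cur' of already-read digits.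
def pvRunsC (cur : List Char) : List Char → List (List Char)
  | [] => if cur ≠ [] then [cur] else []
  | c :: cs =>
    if pvIsDig c then pvRunsC (cur ++ [c]) cs
    else (if cur ≠ [] then [cur] else []) ++ pvRunsC [] cs

theorem pvAok_digits (nums : List Char) (h : ∀ d ∈ nums, pvIsDig d = true) :
    pvAok nums = true := by
  induction nums with
  | nil => rfl
  | cons d ds ih =>
    have hd := h d (by simp)
    have hnot : ¬ (('a' ≤ d ∧ d ≤ 'z') ∨ ('A' ≤ d ∧ d ≤ 'Z') ∨ d = ' ') := by
      simp only [pvIsDig, decide_eq_true_eq] at hd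
      rcases hd with ⟨h1, h2⟩
      rintro (⟨l1, _⟩ | ⟨l2, _⟩ | rfl)
      · exact absurd (le_trans l1 h2) (by decide)
      · exact absurd (le_trans l2 h2) (by decide)
      · exact absurd h1 (by decide)
    simp only [pvAok, List.foldl_cons, if_neg hnot]
    exact ih (fun x hx => h x (by simp [hx]))

theorem pvAcond (c : Char) :
    (c ≠ ' ' ∧ ('0' ≤ c ∧ c ≤ '9')) ↔ pvIsDig c = true := by
  simp only [pvIsDig, decide_eq_true_eq]
  constructor
  · exact fun h => h.2
  · rintro ⟨h1, h2⟩
    refine ⟨fun e => ?_, h1, h2⟩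
    subst e; exact absurd h1 (by decide)

-- A's final flush (the append after the loop), as the proofs' name for it.
def pvFin (p : List String × List Char) : List String :=
  if p.2 ≠ [] then p.1 ++ [String.ofList p.2] else p.1

theorem pvA_foldl (l : List Char) (res : List String) (cur : List Char)
    (h : ∀ d ∈ cur, pvIsDig d = true) :
    pvFin (l.foldl pvAstep (res, cur)) = res ++ (pvRunsC cur l).map String.ofList := by
  induction l generalizing res cur with
  | nil =>
    by_cases hc : cur = []
    · subst hc; simp [pvRunsC, pvFin]
    · simp [pvRunsC, pvFin, hc]
  | cons c cs ih =>
    by_cases hd : pvIsDig c = true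
    · have : pvAstep (res, cur) c = (res, cur ++ [c]) := by
        simp only [pvAstep, if_pos ((pvAcond c).mpr hd)]
      simp only [List.foldl_cons, this, pvRunsC, if_pos hd]
      exact ih res (cur ++ [c]) (by
        intro d hdm
        rcases List.mem_append.mp hdm with h1 | h1
        · exact h d h1
        · simp at h1; subst h1; exact hd)
    · have hcond : ¬ (c ≠ ' ' ∧ ('0' ≤ c ∧ c ≤ '9')) := fun hx => hd ((pvAcond c).mp hx)
      by_cases hc : cur = []
      · subst hc
        have : pvAstep (res, []) c = (res, []) := by
          simp [pvAstep, hcond]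
        simp only [List.foldl_cons, this, pvRunsC, if_neg hd]
        simpa using ih res [] (by simp)
      · have : pvAstep (res, cur) c = (res ++ [String.ofList cur], []) := by
          simp [pvAstep, hcond, hc, pvAok_digits cur h]
        simp only [List.foldl_cons, this, pvRunsC, if_neg hd, if_neg (by simpa using hc)]
        rw [ih (res ++ [String.ofList cur]) [] (by simp)]
        simp [hc]

-- On the masked string, 'is a space' is exactly 'was not a digit'.
theorem pv_isspace_mask (c : Char) :
    PySem.Chars.isspace (pvMask c) = !pvIsDig c := by
  by_cases hd : pvIsDig c = true
  · have : pvMask c = c := by simp [pvMask, hd]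
    rw [this, hd]
    simp only [pvIsDig, decide_eq_true_eq] at hd
    obtain ⟨h1, h2⟩ := hd
    have n1 : 48 ≤ c.toNat := h1
    have n2 : c.toNat ≤ 57 := h2
    simp [PySem.Chars.isspace]
    omega
  · have : pvMask c = ' ' := by simp [pvMask, hd]
    rw [this]
    simp [hd]
    rfl

-- split₀'s worker on a masked list produces exactly the digit runs of the original list.
theorem pv_go_mask (l : List Char) (cur : List Char) (acc : List (List Char)) :
    PySem.Chars.split₀.go (l.map pvMask) cur acc
      = acc.reverse ++ pvRunsC cur.reverse l := by
  induction l generalizing cur acc with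
  | nil =>
    by_cases hc : cur = []
    · subst hc; simp [PySem.Chars.split₀.go, pvRunsC]
    · have : cur.isEmpty = false := by simpa [List.isEmpty_iff] using hc
      simp [PySem.Chars.split₀.go, pvRunsC, this, hc]
  | cons c cs ih =>
    by_cases hd : pvIsDig c = true
    · have hm : pvMask c = c := by simp [pvMask, hd]
      have hsp : PySem.Chars.isspace c = false := by
        rw [← hm, pv_isspace_mask, hd]; rfl
      simp only [List.map_cons, hm, PySem.Chars.split₀.go, hsp]
      rw [ih (c :: cur) acc]
      simp [pvRunsC, hd]
    · have hsp : PySem.Chars.isspace (pvMask c) = true := by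
        rw [pv_isspace_mask]; simp [hd]
      by_cases hc : cur = []
      · subst hc
        simp only [List.map_cons, PySem.Chars.split₀.go, hsp, reduceIte, List.isEmpty_nil]
        rw [ih [] acc]
        simp [pvRunsC, hd]
      · have hne : cur.isEmpty = false := by simpa [List.isEmpty_iff] using hc
        simp only [List.map_cons, PySem.Chars.split₀.go, hsp, reduceIte, hne,
          Bool.false_eq_true, if_neg]
        rw [ih [] (cur.reverse :: acc)]
        simp [pvRunsC, hd, hc]

theorem pv_split_mask (l : List Char) :
    PySem.Chars.split₀ (l.map pvMask) = pvRunsC [] l := by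
  have := pv_go_mask l [] []
  simpa [PySem.Chars.split₀] using this

-- ===== VERDICT (by name: the statement is the Claim_ definition above) =====
theorem palabras_numericas_spec : Claim_equal_palabras_numericas := by
  intro texto _
  unfold Spec_palabras_numericas palabras_numericas palabras_numericas_alt
  have hA : (if (texto.toList.foldl pvAstep ([], [])).2 ≠ [] then
        (texto.toList.foldl pvAstep ([], [])).1 ++ [String.ofList (texto.toList.foldl pvAstep ([], [])).2]
      else (texto.toList.foldl pvAstep ([], [])).1)
      = pvFin (texto.toList.foldl pvAstep ([], [])) := rfl
  simp only [hA, pvA_foldl texto.toList [] [] (by simp), List.nil_append]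
  have hB : PySem.Str.split₀ (String.ofList (texto.toList.map pvMask))
      = (pvRunsC [] texto.toList).map String.ofList := by
    show (PySem.Chars.split₀ ((String.ofList (texto.toList.map pvMask)).toList)).map String.ofList
      = (pvRunsC [] texto.toList).map String.ofList
    rw [show (String.ofList (texto.toList.map pvMask)).toList = texto.toList.map pvMask by simp,
      pv_split_mask]
  rw [hB]
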